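-- pv_equiv track=rewrite | github.com/IDUclub/soika_api | app/preprocessing/modules/geocoder.py | parse_address_components
-- ===== SOURCE A (Python) =====
-- from typing import List, Dict, Any
--
-- def parse_address_components(texts: List[str]) -> Dict[str, str]:
--     result = {"street_name": "", "house_number": ""}
--     for elem in texts:
--         if result["street_name"] and result["house_number"]:
--             break
--         tokens = elem.split()
--         str_tokens: list[str] = []
--         for token in tokens:
--             if token.isdigit():
--                 if not result["house_number"]:
--                     result["house_number"] = token
--             else:
--                 str_tokens.append(token)
--         if str_tokens and not result["street_name"]:
--             result["street_name"] = " ".join(str_tokens)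
--     return result
-- ===== SOURCE B (Python) =====
-- from typing import List, Dict
--
-- def parse_address_components(texts: List[str]) -> Dict[str, str]:
--     house_number = next((t for elem in texts for t in elem.split() if t.isdigit()), "")
--     street_name = next((" ".join(t for t in elem.split() if not t.isdigit())
--                         for elem in texts
--                         if any(not t.isdigit() for t in elem.split())), "")
--     return {"street_name": street_name, "house_number": house_number}
-- ===== Notes on version B (the rewrite author's own statement) =====
-- stated objective: simpler
-- what changed: Replaces A's single interleaved loop with mutable dict state and early break by two independent comprehension passes: house_number = first digit token over all texts, street_name = joined non-digit tokens of the first text containing one.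
import Mathlib
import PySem

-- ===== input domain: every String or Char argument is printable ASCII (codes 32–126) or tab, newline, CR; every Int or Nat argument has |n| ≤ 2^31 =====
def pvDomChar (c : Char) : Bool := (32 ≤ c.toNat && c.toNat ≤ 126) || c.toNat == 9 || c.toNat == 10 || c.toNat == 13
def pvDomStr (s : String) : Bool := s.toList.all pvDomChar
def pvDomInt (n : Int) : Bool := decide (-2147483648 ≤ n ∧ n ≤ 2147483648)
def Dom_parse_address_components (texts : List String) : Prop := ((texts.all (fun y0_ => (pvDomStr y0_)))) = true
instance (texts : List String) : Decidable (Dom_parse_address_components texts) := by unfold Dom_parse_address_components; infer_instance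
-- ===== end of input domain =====

-- B replaces A's single interleaved stateful loop by two independent passes (simpler decomposition; same cost).

-- ===== PORT A =====
-- inner `for token in tokens` loop: state = (house_number, str_tokens)
def pvInnerA (tokens : List String) (h : String) : String × List String :=
  tokens.foldl (fun st token =>
    if PySem.Str.strIsdigit token then
      (if st.1 = "" then (token, st.2) else st)
    else (st.1, st.2 ++ [token])) (h, [])

-- outer `for elem in texts` loop with the early break; state = (street_name, house_number)
def pvLoopA : List String → String → String → String × String
  | [], s, h => (s, h)
  | e :: rest, s, h =>
    if s ≠ "" ∧ h ≠ "" then (s, h)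
    else
      let st := pvInnerA (PySem.Str.split₀ e) h
      let s' := if st.2 ≠ [] ∧ s = "" then PySem.Str.join " " st.2 else s
      pvLoopA rest s' st.1

def parse_address_components (texts : List String) : List (String × String) :=
  let r := pvLoopA texts "" ""
  [("street_name", r.1), ("house_number", r.2)]

-- ===== PORT B =====
-- first digit token in scan order over all texts
def pvHouseB (texts : List String) : String :=
  ((texts.flatMap (fun e => PySem.Str.split₀ e)).find? (fun t => PySem.Str.strIsdigit t)).getD ""

-- joined non-digit tokens of the first text that has any non-digit token
def pvStreetB (texts : List String) : String :=
  match texts.find? (fun e => (PySem.Str.split₀ e).any (fun t => !PySem.Str.strIsdigit t)) with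
  | some e => PySem.Str.join " " ((PySem.Str.split₀ e).filter (fun t => !PySem.Str.strIsdigit t))
  | none => ""

def parse_address_components_alt (texts : List String) : List (String × String) :=
  [("street_name", pvStreetB texts), ("house_number", pvHouseB texts)]

-- ===== PRECONDITION & SPEC =====
def Spec_parse_address_components (texts : List String) (out : List (String × String)) : Prop := out = parse_address_components_alt texts
instance (texts : List String) (out : List (String × String)) : Decidable (Spec_parse_address_components texts out) := by unfold Spec_parse_address_components; infer_instance

-- ===== CLAIM (what is proved, stated in full; the proofs are below) =====
def Claim_equal_parse_address_components : Prop := ∀ (texts : List String), Dom_parse_address_components texts → Spec_parse_address_components texts (parse_address_components texts)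

-- ===== LEMMAS AND PROOFS =====

-- every piece produced by str.split() is a nonempty string
theorem pv_split₀_go_ne_nil (s : List Char) : ∀ (cur : List Char) (acc : List (List Char)),
    (∀ a ∈ acc, a ≠ []) → ∀ p ∈ PySem.Chars.split₀.go s cur acc, p ≠ [] := by
  induction s with
  | nil =>
    intro cur acc hacc p hp
    simp only [PySem.Chars.split₀.go] at hp
    split at hp
    · exact hacc p (List.mem_reverse.mp hp)
    · next hcur =>
      have hp' := List.mem_reverse.mp hp
      rcases List.mem_cons.mp hp' with rfl | hmem
      · simpa using fun hc => hcur (by simp [hc])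
      · exact hacc p hmem
  | cons c rest ih =>
    intro cur acc hacc p hp
    simp only [PySem.Chars.split₀.go] at hp
    split at hp
    · split at hp
      · exact ih [] acc hacc p hp
      · next hcur =>
        refine ih [] (cur.reverse :: acc) ?_ p hp
        intro a ha
        rcases List.mem_cons.mp ha with rfl | ha
        · simpa using fun hc => hcur (by simp [hc])
        · exact hacc a ha
    · exact ih (c :: cur) acc hacc p hp

theorem pv_tok_ne_empty (e t : String) (ht : t ∈ PySem.Str.split₀ e) : t ≠ "" := by
  simp only [PySem.Str.split₀, List.mem_map] at ht
  obtain ⟨p, hp, rfl⟩ := ht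
  have hne : p ≠ [] := pv_split₀_go_ne_nil e.toList [] [] (by simp) p hp
  intro hcontra
  apply hne
  have := congrArg String.toList hcontra
  simpa using this

theorem pv_digit_ne_empty (t : String) (h : PySem.Str.strIsdigit t = true) : t ≠ "" := by
  intro hcontra; subst hcontra
  simp [PySem.Str.strIsdigit, PySem.Chars.strIsdigit] at h

theorem pv_join_ne_empty (t : String) (ts : List String) (h : t ≠ "") :
    PySem.Str.join " " (t :: ts) ≠ "" := by
  intro hcontra
  have hl := congrArg String.toList hcontra
  simp [PySem.Str.join, PySem.Chars.join] at hl
  cases ts with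
  | nil => simp [List.intercalate] at hl; exact h hl
  | cons u us => simp [List.intercalate] at hl

theorem pv_innerA_eq (tokens : List String) : ∀ (h : String) (acc : List String),
    tokens.foldl (fun st token =>
      if PySem.Str.strIsdigit token then
        (if st.1 = "" then (token, st.2) else st)
      else (st.1, st.2 ++ [token])) (h, acc)
    = (if h = "" then ((tokens.find? (fun t => PySem.Str.strIsdigit t)).getD "") else h,
       acc ++ tokens.filter (fun t => !PySem.Str.strIsdigit t)) := by
  induction tokens with
  | nil => intro h acc; simp
  | cons t ts ih =>
    intro h acc
    by_cases hd : PySem.Str.strIsdigit t = true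
    · have hd' : PySem.Chars.strIsdigit t.toList = true := by
        simpa [PySem.Str.strIsdigit] using hd
      by_cases hh : h = ""
      · subst hh
        simp only [List.foldl_cons, hd, if_true]
        rw [ih t acc]
        have htne : t ≠ "" := pv_digit_ne_empty t hd
        simp [hd', htne]
      · simp only [List.foldl_cons, hd, if_true, if_neg hh]
        rw [ih h acc]
        simp [hd', hh]
    · have hd' : PySem.Chars.strIsdigit t.toList = false := by
        simpa [PySem.Str.strIsdigit] using eq_false_of_ne_true hd
      simp only [List.foldl_cons]
      rw [if_neg hd, ih h (acc ++ [t])]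
      simp [hd']

theorem pv_any_iff_filter (e : String) :
    ((PySem.Str.split₀ e).any (fun t => !PySem.Str.strIsdigit t) = true)
      ↔ (PySem.Str.split₀ e).filter (fun t => !PySem.Str.strIsdigit t) ≠ [] := by
  simp [List.any_eq_true, List.filter_eq_nil_iff]

theorem pv_loopA_eq (texts : List String) : ∀ (s h : String),
    pvLoopA texts s h = (if s = "" then pvStreetB texts else s, if h = "" then pvHouseB texts else h) := by
  induction texts with
  | nil =>
    intro s h
    by_cases hs : s = "" <;> by_cases hh : h = "" <;>
      simp [pvLoopA, pvStreetB, pvHouseB, hs, hh]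
  | cons e rest ih =>
    intro s h
    by_cases hb : s ≠ "" ∧ h ≠ ""
    · simp only [pvLoopA, if_pos hb]
      simp [hb.1, hb.2]
    · simp only [pvLoopA, if_neg hb, pvInnerA]
      rw [pv_innerA_eq, ih]
      simp only [List.nil_append]
      have hstreet :
          (if (if ((PySem.Str.split₀ e).filter (fun t => !PySem.Str.strIsdigit t) ≠ [] ∧ s = "")
                then PySem.Str.join " " ((PySem.Str.split₀ e).filter (fun t => !PySem.Str.strIsdigit t)) else s) = ""
            then pvStreetB rest
            else (if ((PySem.Str.split₀ e).filter (fun t => !PySem.Str.strIsdigit t) ≠ [] ∧ s = "")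
                then PySem.Str.join " " ((PySem.Str.split₀ e).filter (fun t => !PySem.Str.strIsdigit t)) else s))
          = (if s = "" then pvStreetB (e :: rest) else s) := by
        by_cases hf : (PySem.Str.split₀ e).filter (fun t => !PySem.Str.strIsdigit t) = []
        · have hpred : ¬ ((PySem.Str.split₀ e).any (fun t => !PySem.Str.strIsdigit t) = true) :=
            fun h1 => (pv_any_iff_filter e).mp h1 hf
          rw [if_neg (show ¬ ((PySem.Str.split₀ e).filter (fun t => !PySem.Str.strIsdigit t) ≠ [] ∧ s = "") from fun hc => hc.1 hf)]
          have hsc : pvStreetB (e :: rest) = pvStreetB rest := by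
            simp only [pvStreetB]
            rw [List.find?_cons_of_neg (p := fun e => (PySem.Str.split₀ e).any fun t => !PySem.Str.strIsdigit t) hpred]
          rw [hsc]
        · have hpred : ((PySem.Str.split₀ e).any (fun t => !PySem.Str.strIsdigit t)) = true :=
            (pv_any_iff_filter e).mpr hf
          have hjoin : PySem.Str.join " " ((PySem.Str.split₀ e).filter (fun t => !PySem.Str.strIsdigit t)) ≠ "" := by
            rcases hfl : (PySem.Str.split₀ e).filter (fun t => !PySem.Str.strIsdigit t) with _ | ⟨f0, fs⟩
            · exact absurd hfl hf
            · have hf0 : f0 ∈ PySem.Str.split₀ e := by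
                have : f0 ∈ (PySem.Str.split₀ e).filter (fun t => !PySem.Str.strIsdigit t) := by
                  rw [hfl]; exact List.mem_cons_self
                exact List.mem_of_mem_filter this
              exact pv_join_ne_empty f0 fs (pv_tok_ne_empty e f0 hf0)
          have hsc : pvStreetB (e :: rest)
              = PySem.Str.join " " ((PySem.Str.split₀ e).filter (fun t => !PySem.Str.strIsdigit t)) := by
            simp only [pvStreetB]
            rw [List.find?_cons_of_pos (p := fun e => (PySem.Str.split₀ e).any fun t => !PySem.Str.strIsdigit t) hpred]
          rw [hsc]
          by_cases hs : s = ""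
          · rw [if_pos (show (PySem.Str.split₀ e).filter (fun t => !PySem.Str.strIsdigit t) ≠ [] ∧ s = "" from ⟨hf, hs⟩), if_neg hjoin, if_pos hs]
          · rw [if_neg (show ¬ ((PySem.Str.split₀ e).filter (fun t => !PySem.Str.strIsdigit t) ≠ [] ∧ s = "") from fun hc => hs hc.2), if_neg hs, if_neg hs]
      have hhouse :
          (if (if h = "" then ((PySem.Str.split₀ e).find? (fun t => PySem.Str.strIsdigit t)).getD "" else h) = ""
            then pvHouseB rest
            else (if h = "" then ((PySem.Str.split₀ e).find? (fun t => PySem.Str.strIsdigit t)).getD "" else h))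
          = (if h = "" then pvHouseB (e :: rest) else h) := by
        have hcons : pvHouseB (e :: rest)
            = (((PySem.Str.split₀ e).find? (fun t => PySem.Str.strIsdigit t)).or
               ((rest.flatMap (fun e => PySem.Str.split₀ e)).find? (fun t => PySem.Str.strIsdigit t))).getD "" := by
          simp only [pvHouseB, List.flatMap_cons, List.find?_append]
        by_cases hh : h = ""
        · subst hh
          rw [if_pos rfl, if_pos rfl, hcons]
          rcases hfd : (PySem.Str.split₀ e).find? (fun t => PySem.Str.strIsdigit t) with _ | t
          · simp only [Option.getD_none, Option.none_or]
            rfl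
          · have ht : t ≠ "" := pv_digit_ne_empty t (by simpa using List.find?_some hfd)
            simp only [Option.getD_some, Option.some_or, if_neg ht]
        · rw [if_neg hh, if_neg hh, if_neg hh]
      exact Prod.ext hstreet hhouse

-- ===== VERDICT (by name: the statement is the Claim_ definition above) =====
theorem parse_address_components_spec : Claim_equal_parse_address_components := by
  intro texts _
  unfold Spec_parse_address_components parse_address_components parse_address_components_alt
  rw [pv_loopA_eq texts "" ""]
  simp
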